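-- pv_equiv track=rewrite | github.com/Cyb3rKotl3Ta/Just_Chill_Python | codewars/foundation/ex_57_Directions_Reduction.py | dir_reduc_v2
-- ===== SOURCE A (Python) =====
-- def dir_reduc_v2(arr):
--     opposites = {'NORTH': 'SOUTH', 'SOUTH': 'NORTH', 'EAST': 'WEST', 'WEST': 'EAST'}
--     stack = []
--
--     for direction in arr:
--         if stack and stack[-1] == opposites[direction]:
--             stack.pop()
--         else:
--             stack.append(direction)
--
--     return stack
-- ===== SOURCE B (Python) =====
-- def dir_reduc_v2(arr):
--     opposites = {'NORTH': 'SOUTH', 'SOUTH': 'NORTH', 'EAST': 'WEST', 'WEST': 'EAST'}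
--     result = list(arr)
--     changed = True
--     while changed:
--         changed = False
--         new = []
--         i = 0
--         while i < len(result):
--             if i + 1 < len(result) and opposites.get(result[i]) == result[i + 1]:
--                 i += 2
--                 changed = True
--             else:
--                 new.append(result[i])
--                 i += 1
--         result = new
--     return result
-- ===== Notes on version B (the rewrite author's own statement) =====
-- stated objective: alternative
-- what changed: Replaces the single-pass stack reduction by repeated full left-to-right scans that drop adjacent opposite pairs until a pass makes no change (fixed-point rewriting instead of a stack).
-- outside the precondition, e.g. on dir_reduc_v2(['NORTH', 'SOUTH', 'FOO']): A returns ['FOO'], B returns ['FOO']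
import Mathlib
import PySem

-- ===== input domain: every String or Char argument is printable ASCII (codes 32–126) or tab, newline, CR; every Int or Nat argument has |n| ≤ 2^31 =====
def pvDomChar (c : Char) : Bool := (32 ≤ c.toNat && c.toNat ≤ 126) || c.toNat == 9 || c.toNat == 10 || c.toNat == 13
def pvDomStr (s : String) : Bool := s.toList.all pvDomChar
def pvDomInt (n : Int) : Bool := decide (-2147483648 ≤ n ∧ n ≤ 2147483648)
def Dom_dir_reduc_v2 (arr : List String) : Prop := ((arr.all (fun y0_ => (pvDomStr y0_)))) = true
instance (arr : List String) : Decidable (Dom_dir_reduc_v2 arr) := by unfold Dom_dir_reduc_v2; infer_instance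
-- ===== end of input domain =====

-- B replaces A's single-pass stack by repeated whole-list scans that drop adjacent opposite
-- pairs until a pass makes no removal (fixed-point rewriting); alternative, not faster.


-- ===== PORT A =====
def pyOpposites : PySem.Dict String String :=
  PySem.Dict.ofList [("NORTH", "SOUTH"), ("SOUTH", "NORTH"), ("EAST", "WEST"), ("WEST", "EAST")]

-- opposites[direction]; Python raises KeyError on a missing key (such inputs are outside Pre_)
def opp (d : String) : Option String := pyOpposites.get? d

-- one iteration of A's for-loop (stack held top-first: Python's list end is the head here)
def dirStep (stack : List String) (d : String) : List String :=
  match stack with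
  | t :: rest => if some t = opp d then rest else d :: t :: rest
  | [] => [d]

def dir_reduc_v2 (arr : List String) : List String :=
  (arr.foldl dirStep []).reverse

-- ===== PORT B =====
-- one full scan of B's inner while-loop: drop each adjacent opposite pair, flag any removal
def onePass : List String → List String × Bool
  | [] => ([], false)
  | [a] => ([a], false)
  | a :: b :: rest =>
    if opp a = some b then ((onePass rest).1, true)
    else
      let r := onePass (b :: rest)
      (a :: r.1, r.2)
termination_by l => l.length

-- termination measure for B's outer loop (cited by reduceFix's decreasing_by)
theorem onePass_shrinks (l : List String) :
    (onePass l).1.length ≤ l.length ∧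
      ((onePass l).2 = true → (onePass l).1.length < l.length) := by
  have key : ∀ (n : Nat) (l : List String), l.length ≤ n →
      (onePass l).1.length ≤ l.length ∧
        ((onePass l).2 = true → (onePass l).1.length < l.length) := by
    intro n
    induction n with
    | zero =>
      intro l hl
      cases l with
      | nil => simp [onePass]
      | cons a t => simp at hl
    | succ n ih =>
      intro l hl
      cases l with
      | nil => simp [onePass]
      | cons a t =>
        cases t with
        | nil => simp [onePass]
        | cons b rest =>
          simp only [List.length_cons] at hl
          by_cases h : opp a = some b
          · obtain ⟨h1, _⟩ := ih rest (by omega)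
            simp [onePass, h]
            omega
          · obtain ⟨h1, h2⟩ := ih (b :: rest) (by simp; omega)
            simp only [onePass, if_neg h, List.length_cons]
            refine ⟨by simpa using Nat.succ_le_succ (by simpa using h1), ?_⟩
            intro ht
            have := h2 ht
            simp at this ⊢
            omega
  exact key l.length l le_rfl

-- B's outer while-loop: rescan until a pass makes no removal
def reduceFix (l : List String) : List String :=
  let p := onePass l
  if h : p.2 = true then reduceFix p.1 else p.1
termination_by l.length
decreasing_by exact (onePass_shrinks l).2 h

def dir_reduc_v2_alt (arr : List String) : List String := reduceFix arr

-- ===== PRECONDITION & SPEC =====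
-- Pre_ allows an arbitrary first token (A pushes it without any lookup) but requires every later
-- token to be one of the four directions: on a non-direction token later in the list A raises
-- KeyError whenever the stack is non-empty when that token is scanned, and returns only by
-- accident of the stack state otherwise.
def Pre_dir_reduc_v2 (arr : List String) : Prop :=
  ∀ s ∈ arr.tail, s ∈ ["NORTH", "SOUTH", "EAST", "WEST"]
instance (arr : List String) : Decidable (Pre_dir_reduc_v2 arr) := by
  unfold Pre_dir_reduc_v2; infer_instance

def pvWitness_dir_reduc_v2 : List String := ["NORTH", "WEST", "SOUTH", "EAST"]

def Spec_dir_reduc_v2 (arr : List String) (out : List String) : Prop := out = dir_reduc_v2_alt arr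
instance (arr : List String) (out : List String) : Decidable (Spec_dir_reduc_v2 arr out) := by
  unfold Spec_dir_reduc_v2; infer_instance

-- ===== CLAIM (what is proved, stated in full; the proofs are below) =====
def Claim_equal_dir_reduc_v2 : Prop :=
  ∀ (arr : List String), Dom_dir_reduc_v2 arr → Pre_dir_reduc_v2 arr →
    Spec_dir_reduc_v2 arr (dir_reduc_v2 arr)

-- ===== LEMMAS AND PROOFS =====

-- evaluating the lookup: opp a is some b exactly for the four dictionary pairs
theorem opp_cases {a b : String} (h : opp a = some b) :
    (a = "NORTH" ∧ b = "SOUTH") ∨ (a = "SOUTH" ∧ b = "NORTH") ∨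
      (a = "EAST" ∧ b = "WEST") ∨ (a = "WEST" ∧ b = "EAST") := by
  have e : opp a =
      if ("NORTH" == a) then some "SOUTH"
      else if ("SOUTH" == a) then some "NORTH"
      else if ("EAST" == a) then some "WEST"
      else if ("WEST" == a) then some "EAST"
      else none := by
    show (PySem.Dict.mk [("NORTH", "SOUTH"), ("SOUTH", "NORTH"),
        ("EAST", "WEST"), ("WEST", "EAST")]).get? a = _
    rw [PySem.Dict.get?_mk_cons, PySem.Dict.get?_mk_cons,
        PySem.Dict.get?_mk_cons, PySem.Dict.get?_mk_cons]
    rfl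
  rw [e] at h
  split_ifs at h with h1 h2 h3 h4
  · exact Or.inl ⟨(eq_of_beq h1).symm, (Option.some.inj h).symm⟩
  · exact Or.inr (Or.inl ⟨(eq_of_beq h2).symm, (Option.some.inj h).symm⟩)
  · exact Or.inr (Or.inr (Or.inl ⟨(eq_of_beq h3).symm, (Option.some.inj h).symm⟩))
  · exact Or.inr (Or.inr (Or.inr ⟨(eq_of_beq h4).symm, (Option.some.inj h).symm⟩))

theorem opp_symm {a b : String} (h : opp a = some b) : opp b = some a := by
  rcases opp_cases h with ⟨rfl, rfl⟩ | ⟨rfl, rfl⟩ | ⟨rfl, rfl⟩ | ⟨rfl, rfl⟩ <;> decide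

-- no adjacent opposite pair anywhere in the list
def NoCancel : List String → Prop
  | a :: b :: rest => opp a ≠ some b ∧ NoCancel (b :: rest)
  | _ => True

theorem noCancel_tail {x : String} {l : List String} (h : NoCancel (x :: l)) : NoCancel l := by
  cases l with
  | nil => trivial
  | cons u r => exact h.2

theorem noCancel_dirStep {st : List String} (hst : NoCancel st) (d : String) :
    NoCancel (dirStep st d) := by
  cases st with
  | nil => simp [dirStep, NoCancel]
  | cons t rest =>
    by_cases h : some t = opp d
    · simpa [dirStep, h] using noCancel_tail hst
    · simp only [dirStep, if_neg h]
      exact ⟨fun hc => h hc.symm, hst⟩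

-- A's stack invariant: applying dirStep twice with an opposite pair is the identity
theorem cancel_pair {x y : String} {st : List String} (hx : opp x = some y)
    (hst : NoCancel st) : dirStep (dirStep st x) y = st := by
  cases st with
  | nil => simp [dirStep, opp_symm hx]
  | cons t rest =>
    by_cases h : some t = opp x
    · have ht : t = y := by rw [hx] at h; exact Option.some.inj h
      subst ht
      simp only [dirStep, if_pos h]
      cases rest with
      | nil => simp
      | cons u r =>
        have hnc : opp t ≠ some u := hst.1
        have hcond : ¬ some u = opp t := fun hc => hnc hc.symm
        simp [hcond]
    · simp [dirStep, h, opp_symm hx]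

theorem foldl_cancel {x y : String} (hx : opp x = some y) {st : List String}
    (hst : NoCancel st) (s : List String) :
    List.foldl dirStep st (x :: y :: s) = List.foldl dirStep st s := by
  simp only [List.foldl_cons]
  rw [cancel_pair hx hst]

-- induction principle following onePass's recursion
theorem onePass_rec (P : List String → Prop) (h0 : P []) (h1 : ∀ a, P [a])
    (h2 : ∀ a b rest, opp a = some b → P rest → P (a :: b :: rest))
    (h3 : ∀ a b rest, ¬ opp a = some b → P (b :: rest) → P (a :: b :: rest)) :
    ∀ l, P l := by
  have key : ∀ (n : Nat) (l : List String), l.length ≤ n → P l := by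
    intro n
    induction n with
    | zero =>
      intro l hl
      cases l with
      | nil => exact h0
      | cons a t => simp at hl
    | succ n ih =>
      intro l hl
      cases l with
      | nil => exact h0
      | cons a t =>
        cases t with
        | nil => exact h1 a
        | cons b rest =>
          simp only [List.length_cons] at hl
          by_cases h : opp a = some b
          · exact h2 a b rest h (ih rest (by omega))
          · exact h3 a b rest h (ih (b :: rest) (by simp; omega))
  exact fun l => key l.length l le_rfl

-- one scan of B does not change A's stack reduction
theorem foldl_onePass : ∀ l : List String, ∀ st : List String, NoCancel st →
    List.foldl dirStep st (onePass l).1 = List.foldl dirStep st l := by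
  refine onePass_rec _ (by simp [onePass]) (by simp [onePass]) ?_ ?_
  · intro a b rest h ih st hst
    have e : (onePass (a :: b :: rest)).1 = (onePass rest).1 := by simp [onePass, h]
    rw [e, ih st hst]
    exact (foldl_cancel h hst rest).symm
  · intro a b rest h ih st hst
    have e : (onePass (a :: b :: rest)).1 = a :: (onePass (b :: rest)).1 := by
      simp [onePass, h]
    rw [e]
    simp only [List.foldl_cons]
    exact ih (dirStep st a) (noCancel_dirStep hst a)

theorem onePass_false_eq : ∀ l : List String, (onePass l).2 = false → (onePass l).1 = l := by
  refine onePass_rec _ (by simp [onePass]) (by simp [onePass]) ?_ ?_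
  · intro a b rest h _ hf
    simp [onePass, h] at hf
  · intro a b rest h ih hf
    have hf' : (onePass (b :: rest)).2 = false := by simpa [onePass, h] using hf
    simp [onePass, h, ih hf']

theorem onePass_false_noCancel : ∀ l : List String, (onePass l).2 = false → NoCancel l := by
  refine onePass_rec _ (by intro; trivial) (by intro a _; trivial) ?_ ?_
  · intro a b rest h _ hf
    simp [onePass, h] at hf
  · intro a b rest h ih hf
    have hf' : (onePass (b :: rest)).2 = false := by simpa [onePass, h] using hf
    exact ⟨h, ih hf'⟩

-- A's reduction of an already fully reduced list is the list itself
theorem foldl_irred : ∀ l : List String, ∀ st : List String, NoCancel l →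
    (∀ t h', st.head? = some t → l.head? = some h' → opp h' ≠ some t) →
    List.foldl dirStep st l = l.reverse ++ st := by
  intro l
  induction l with
  | nil => intro st _ _; simp
  | cons d rest ih =>
    intro st hl hcross
    have hd : dirStep st d = d :: st := by
      cases st with
      | nil => rfl
      | cons t r =>
        have hcond : ¬ some t = opp d := by
          intro hc
          exact hcross t d rfl rfl hc.symm
        simp [dirStep, hcond]
    rw [List.foldl_cons, hd, ih (d :: st) (noCancel_tail hl) ?_]
    · simp
    · intro t h' ht hh'
      have ht' : d = t := by simpa using ht
      subst ht'
      intro hc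
      cases rest with
      | nil => simp at hh'
      | cons u r =>
        have hh'' : u = h' := by simpa using hh'
        subst hh''
        exact hl.1 (opp_symm hc)

theorem red_onePass (l : List String) : dir_reduc_v2 (onePass l).1 = dir_reduc_v2 l := by
  unfold dir_reduc_v2
  rw [foldl_onePass l [] trivial]

-- B's fixed point preserves A's reduction and is fully reduced
theorem reduceFix_props : ∀ (n : Nat) (l : List String), l.length ≤ n →
    dir_reduc_v2 (reduceFix l) = dir_reduc_v2 l ∧ NoCancel (reduceFix l) := by
  intro n
  induction n with
  | zero =>
    intro l hl
    have hnil : l = [] := by cases l with | nil => rfl | cons a t => simp at hl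
    subst hnil
    have e : reduceFix [] = [] := by rw [reduceFix.eq_def]; simp [onePass]
    rw [e]
    exact ⟨rfl, trivial⟩
  | succ n ih =>
    intro l hl
    by_cases hc : (onePass l).2 = true
    · have hlt := (onePass_shrinks l).2 hc
      have e : reduceFix l = reduceFix (onePass l).1 := by
        rw [reduceFix.eq_def]; simp [hc]
      obtain ⟨h1, h2⟩ := ih (onePass l).1 (by omega)
      exact ⟨by rw [e, h1, red_onePass], by rw [e]; exact h2⟩
    · have e : reduceFix l = (onePass l).1 := by
        rw [reduceFix.eq_def]; simp [hc]
      have hf : (onePass l).2 = false := by simpa using hc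
      constructor
      · rw [e]; exact red_onePass l
      · rw [e, onePass_false_eq l hf]
        exact onePass_false_noCancel l hf

theorem red_of_noCancel {l : List String} (h : NoCancel l) : dir_reduc_v2 l = l := by
  unfold dir_reduc_v2
  rw [foldl_irred l [] h (by intro t h' ht _; simp at ht)]
  simp

-- ===== VERDICT (by name: the statement is the Claim_ definition above) =====
theorem dir_reduc_v2_spec : Claim_equal_dir_reduc_v2 := by
  intro arr _ _
  unfold Spec_dir_reduc_v2 dir_reduc_v2_alt
  obtain ⟨h1, h2⟩ := reduceFix_props arr.length arr le_rfl
  calc dir_reduc_v2 arr = dir_reduc_v2 (reduceFix arr) := h1.symm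
    _ = reduceFix arr := red_of_noCancel h2
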